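-- pv_equiv track=rewrite | github.com/pypi-data/pypi-mirror-396 | packages/baicai-tutor/baicai_tutor-0.1.0.tar.gz/baicai_tutor-0.1.0/baicai_tutor/utils/md_process.py | get_metadata_section
-- ===== SOURCE A (Python) =====
-- def get_metadata_section(content: str) -> tuple:
--     """获取Markdown文件的元数据部分和剩余内容"""
--     lines = content.split("\n")
--     metadata_lines = []
--     remaining_lines = []
--     in_metadata = False
--     metadata_end_index = 0
--
--     for i, line in enumerate(lines):
--         if line.strip() == "---":
--             if not in_metadata:
--                 in_metadata = True
--                 metadata_lines.append(line)
--             else: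
--                 metadata_lines.append(line)
--                 metadata_end_index = i
--                 break
--         elif in_metadata:
--             metadata_lines.append(line)
--         else:
--             remaining_lines.append(line)
--
--     # 如果找到了完整的元数据块，返回元数据和剩余内容
--     if in_metadata and metadata_end_index > 0:
--         remaining_lines = lines[metadata_end_index + 1 :]
--         return metadata_lines, remaining_lines
--     else:
--         return [], lines
-- ===== SOURCE B (Python) =====
-- def get_metadata_section(content: str) -> tuple:
--     """获取Markdown文件的元数据部分和剩余内容"""
--     lines = content.split("\n")
--     idx = [i for i, line in enumerate(lines) if line.strip() == "---"]
--     if len(idx) >= 2: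
--         start, end = idx[0], idx[1]
--         return lines[start:end + 1], lines[end + 1:]
--     return [], lines
-- ===== Notes on version B (the rewrite author's own statement) =====
-- stated objective: simpler
-- what changed: Replaced the stateful in_metadata flag loop and incremental appends by a single comprehension collecting all delimiter indices, then plain slicing between the first two indices.
import Mathlib
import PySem

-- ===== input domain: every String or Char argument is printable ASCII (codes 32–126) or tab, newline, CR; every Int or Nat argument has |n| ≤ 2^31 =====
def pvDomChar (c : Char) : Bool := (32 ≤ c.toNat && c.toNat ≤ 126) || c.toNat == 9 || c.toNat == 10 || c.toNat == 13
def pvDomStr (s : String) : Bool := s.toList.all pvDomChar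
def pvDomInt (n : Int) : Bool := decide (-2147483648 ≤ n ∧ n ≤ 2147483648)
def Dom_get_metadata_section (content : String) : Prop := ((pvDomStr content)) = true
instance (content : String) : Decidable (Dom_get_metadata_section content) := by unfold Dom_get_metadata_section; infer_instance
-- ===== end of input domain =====

-- B replaces A's stateful in_metadata flag loop by collecting all delimiter indices once and slicing (simpler decomposition; same O(n) cost).

-- ===== PORT A =====
-- the for-loop of A with state (metadata_lines, remaining_lines, in_metadata, metadata_end_index); early return models `break`
def pvLoopA : List (Int × String) → List String → List String → Bool → Int →
    List String × List String × Bool × Int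
  | [], m, r, inm, e => (m, r, inm, e)
  | (i, line) :: rest, m, r, inm, e =>
    if PySem.Str.strip line = "---" then
      if !inm then pvLoopA rest (m ++ [line]) r true e
      else (m ++ [line], r, inm, i)   -- break
    else if inm then pvLoopA rest (m ++ [line]) r inm e
    else pvLoopA rest m (r ++ [line]) inm e

def get_metadata_section (content : String) : List String × List String :=
  let lines := (PySem.Chars.splitOn content.toList ['\n']).map String.ofList  -- content.split("\n"), exact for nonempty sep
  match pvLoopA (PySem.List.enumerate lines 0) [] [] false 0 with
  | (m, _r, inm, e) =>
    if inm && e > 0 then (m, PySem.List.slice lines (some (e + 1)) none)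
    else ([], lines)

-- ===== PORT B =====
def get_metadata_section_alt (content : String) : List String × List String :=
  let lines := (PySem.Chars.splitOn content.toList ['\n']).map String.ofList  -- content.split("\n"), exact for nonempty sep
  let idx := (PySem.List.enumerate lines 0).filterMap
      (fun p => if PySem.Str.strip p.2 = "---" then some p.1 else none)
  match idx with
  | i0 :: i1 :: _ =>
      (PySem.List.slice lines (some i0) (some (i1 + 1)),
       PySem.List.slice lines (some (i1 + 1)) none)
  | _ => ([], lines)

-- ===== PRECONDITION & SPEC =====
def Spec_get_metadata_section (content : String) (out : List String × List String) : Prop := out = get_metadata_section_alt content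
instance (content : String) (out : List String × List String) : Decidable (Spec_get_metadata_section content out) := by unfold Spec_get_metadata_section; infer_instance

-- ===== CLAIM (what is proved, stated in full; the proofs are below) =====
def Claim_equal_get_metadata_section : Prop := ∀ (content : String), Dom_get_metadata_section content → Spec_get_metadata_section content (get_metadata_section content)

-- ===== LEMMAS AND PROOFS =====

-- Bool form of "line.strip() != '---'" used to split `lines` at the delimiters
def pvNd (l : String) : Bool := !decide (PySem.Str.strip l = "---")

theorem pvNd_true {l : String} (h : pvNd l = true) : PySem.Str.strip l ≠ "---" := by
  simpa [pvNd] using h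

theorem pvLoopA_true_nil (xs : List String) (s : Int) (m r : List String) (e : Int)
    (h : ∀ x ∈ xs, pvNd x = true) :
    pvLoopA (PySem.List.enumerate xs s) m r true e = (m ++ xs, r, true, e) := by
  induction xs generalizing s m with
  | nil => simp [PySem.List.enumerate_nil, pvLoopA]
  | cons x xs ih =>
    rw [PySem.List.enumerate_cons]
    simp only [pvLoopA, if_neg (pvNd_true (h x (by simp)))]
    rw [ih (s + 1) (m ++ [x]) (fun y hy => h y (by simp [hy]))]
    simp

theorem pvLoopA_false_nil (xs : List String) (s : Int) (r : List String)
    (h : ∀ x ∈ xs, pvNd x = true) :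
    pvLoopA (PySem.List.enumerate xs s) [] r false 0 = ([], r ++ xs, false, 0) := by
  induction xs generalizing s r with
  | nil => simp [PySem.List.enumerate_nil, pvLoopA]
  | cons x xs ih =>
    rw [PySem.List.enumerate_cons]
    simp only [pvLoopA, if_neg (pvNd_true (h x (by simp)))]
    rw [ih (s + 1) (r ++ [x]) (fun y hy => h y (by simp [hy]))]
    simp

theorem pvLoopA_true_found (t : List String) (d : String) (rest : List String) (s : Int)
    (m r : List String) (e : Int)
    (ht : ∀ x ∈ t, pvNd x = true) (hd : PySem.Str.strip d = "---") :
    pvLoopA (PySem.List.enumerate (t ++ d :: rest) s) m r true e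
      = (m ++ t ++ [d], r, true, s + t.length) := by
  induction t generalizing s m with
  | nil =>
    rw [List.nil_append, PySem.List.enumerate_cons]
    simp [pvLoopA, hd]
  | cons x t ih =>
    rw [List.cons_append, PySem.List.enumerate_cons]
    simp only [pvLoopA, if_neg (pvNd_true (ht x (by simp)))]
    rw [ih (s + 1) (m ++ [x]) (fun y hy => ht y (by simp [hy]))]
    simp [List.append_assoc]
    omega

theorem pvLoopA_false_found (t : List String) (d : String) (rest : List String) (s : Int)
    (r : List String)
    (ht : ∀ x ∈ t, pvNd x = true) (hd : PySem.Str.strip d = "---") :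
    pvLoopA (PySem.List.enumerate (t ++ d :: rest) s) [] r false 0
      = pvLoopA (PySem.List.enumerate rest (s + t.length + 1)) [d] (r ++ t) true 0 := by
  induction t generalizing s r with
  | nil =>
    rw [List.nil_append, PySem.List.enumerate_cons]
    simp [pvLoopA, hd]
  | cons x t ih =>
    rw [List.cons_append, PySem.List.enumerate_cons]
    simp only [pvLoopA, if_neg (pvNd_true (ht x (by simp)))]
    rw [ih (s + 1) (r ++ [x]) (fun y hy => ht y (by simp [hy]))]
    rw [show (s + 1 + (t.length : ℤ) + 1) = s + ((x :: t).length : ℤ) + 1 by push_cast [List.length_cons]; ring,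
        show r ++ [x] ++ t = r ++ x :: t by simp]
    simp

-- index collection: skipping a non-delimiter prefix
theorem pvIdx_skip (t rest : List String) (s : Int) (ht : ∀ x ∈ t, pvNd x = true) :
    (PySem.List.enumerate (t ++ rest) s).filterMap
        (fun p => if PySem.Str.strip p.2 = "---" then some p.1 else none)
      = (PySem.List.enumerate rest (s + t.length)).filterMap
        (fun p => if PySem.Str.strip p.2 = "---" then some p.1 else none) := by
  induction t generalizing s with
  | nil => simp
  | cons x t ih =>
    rw [List.cons_append, PySem.List.enumerate_cons]
    simp only [List.filterMap_cons, if_neg (pvNd_true (ht x (by simp)))]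
    rw [ih (s + 1) (fun y hy => ht y (by simp [hy]))]
    rw [show (s + 1 + (t.length : ℤ)) = s + ((x :: t).length : ℤ) by push_cast [List.length_cons]; ring]

theorem pvIdx_cons (d : String) (rest : List String) (s : Int) (hd : PySem.Str.strip d = "---") :
    (PySem.List.enumerate (d :: rest) s).filterMap
        (fun p => if PySem.Str.strip p.2 = "---" then some p.1 else none)
      = s :: (PySem.List.enumerate rest (s + 1)).filterMap
        (fun p => if PySem.Str.strip p.2 = "---" then some p.1 else none) := by
  rw [PySem.List.enumerate_cons]
  simp [hd]

-- the two ports agree for every list of lines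
theorem pvCore (lines : List String) :
    (match pvLoopA (PySem.List.enumerate lines 0) [] [] false 0 with
     | (m, _r, inm, e) =>
       if inm && e > 0 then (m, PySem.List.slice lines (some (e + 1)) none)
       else ([], lines))
    = (match (PySem.List.enumerate lines 0).filterMap
          (fun p => if PySem.Str.strip p.2 = "---" then some p.1 else none) with
       | i0 :: i1 :: _ =>
          (PySem.List.slice lines (some i0) (some (i1 + 1)),
           PySem.List.slice lines (some (i1 + 1)) none)
       | _ => ([], lines)) := by
  have hdec := (List.takeWhile_append_dropWhile (p := pvNd) (l := lines)).symm
  rcases h1 : lines.dropWhile pvNd with _ | ⟨d1, rest1⟩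
  · -- no delimiter at all
    rw [h1, List.append_nil] at hdec
    have hall : ∀ x ∈ lines, pvNd x = true := by
      intro x hx; rw [hdec] at hx; exact List.mem_takeWhile_imp hx
    rw [pvLoopA_false_nil lines 0 [] hall]
    rw [show lines = lines ++ ([] : List String) by simp, pvIdx_skip lines [] 0 hall]
    simp
  · -- first delimiter found
    have hd1 : PySem.Str.strip d1 = "---" := by
      have := List.head_dropWhile_not pvNd (l := lines) (w := by simp [h1])
      simp only [pvNd, h1, List.head_cons, Bool.not_eq_false', decide_eq_true_eq] at this
      exact this
    have ht1 : ∀ x ∈ lines.takeWhile pvNd, pvNd x = true := fun x hx => List.mem_takeWhile_imp hx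
    rw [h1] at hdec
    set t1 := lines.takeWhile pvNd with ht1def
    rw [hdec, pvLoopA_false_found t1 d1 rest1 0 [] ht1 hd1,
        pvIdx_skip t1 (d1 :: rest1) 0 ht1, pvIdx_cons d1 rest1 _ hd1]
    simp only [List.nil_append]
    rcases h2 : rest1.dropWhile pvNd with _ | ⟨d2, rest2⟩
    · -- only one delimiter: both return ([], lines)
      have hdec2 := (List.takeWhile_append_dropWhile (p := pvNd) (l := rest1)).symm
      rw [h2, List.append_nil] at hdec2
      have hall2 : ∀ x ∈ rest1, pvNd x = true := by
        intro x hx; rw [hdec2] at hx; exact List.mem_takeWhile_imp hx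
      simp only [pvLoopA_true_nil rest1 _ [d1] t1 0 hall2]
      rw [show rest1 = rest1 ++ ([] : List String) by simp, pvIdx_skip rest1 [] _ hall2]
      simp
    · -- two delimiters
      have hd2 : PySem.Str.strip d2 = "---" := by
        have := List.head_dropWhile_not pvNd (l := rest1) (w := by simp [h2])
        simp only [pvNd, h2, List.head_cons, Bool.not_eq_false', decide_eq_true_eq] at this
        exact this
      have ht2 : ∀ x ∈ rest1.takeWhile pvNd, pvNd x = true := fun x hx => List.mem_takeWhile_imp hx
      have hdec2 := (List.takeWhile_append_dropWhile (p := pvNd) (l := rest1)).symm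
      rw [h2] at hdec2
      set t2 := rest1.takeWhile pvNd with ht2def
      rw [hdec2]
      simp only [pvLoopA_true_found t2 d2 rest2 _ [d1] t1 0 ht2 hd2,
          pvIdx_skip t2 (d2 :: rest2) _ ht2, pvIdx_cons d2 rest2 _ hd2]
      -- both sides now reduce to explicit slices of lines = t1 ++ d1 :: (t2 ++ d2 :: rest2)
      rw [if_pos (by simp; omega)]
      have hi1 : ((0 : ℤ) + t1.length + 1 + t2.length + 1) = ((t1.length + t2.length + 2 : ℕ) : ℤ) := by
        push_cast; ring
      have hi0 : ((0 : ℤ) + t1.length) = ((t1.length : ℕ) : ℤ) := by ring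
      rw [hi1, hi0, PySem.List.slice_from_natCast, PySem.List.slice_natCast]
      have hfst : List.take (t1.length + t2.length + 2 - t1.length)
          (List.drop t1.length (t1 ++ d1 :: (t2 ++ d2 :: rest2))) = [d1] ++ t2 ++ [d2] := by
        rw [List.drop_left]
        rw [show t1.length + t2.length + 2 - t1.length = (d1 :: t2).length + 1 by simp; omega]
        rw [show d1 :: (t2 ++ d2 :: rest2) = (d1 :: t2) ++ (d2 :: rest2) by simp]
        rw [List.take_length_add_append]
        simp
      rw [hfst]

-- ===== VERDICT (by name: the statement is the Claim_ definition above) =====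
theorem get_metadata_section_spec : Claim_equal_get_metadata_section := by
  intro content _
  unfold Spec_get_metadata_section get_metadata_section get_metadata_section_alt
  exact pvCore _
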